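-- pv_equiv track=rewrite | github.com/CronoPT/bus_network_optimization | scripts/generate_route_pool_made.py | filter_zags
-- ===== SOURCE A (Python) =====
-- def filter_zags(route):
-- 	changed = True
--
-- 	while changed:
-- 		changed = False
--
-- 		for i in range(len(route)-2):
-- 			inspect = route[i:i+3]
-- 			if inspect[0] == inspect[-1]:
-- 				changed = True
-- 				route   = route[0:i] + route[i+2:]
-- 				break
--
-- 	return route
-- ===== SOURCE B (Python) =====
-- def filter_zags(route):
--     stack = []
--     for x in route:
--         if len(stack) >= 2 and stack[-2] == x:
--             stack.pop()
--             stack.pop()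
--             stack.append(x)
--         else:
--             stack.append(x)
--     return stack
-- ===== Notes on version B (the rewrite author's own statement) =====
-- stated objective: faster
-- what changed: Replaced the restart-the-scan-after-each-removal fixpoint loop with a single left-to-right stack pass that cancels a zigzag as soon as the element two below the stack top equals the incoming element.
import Mathlib
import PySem

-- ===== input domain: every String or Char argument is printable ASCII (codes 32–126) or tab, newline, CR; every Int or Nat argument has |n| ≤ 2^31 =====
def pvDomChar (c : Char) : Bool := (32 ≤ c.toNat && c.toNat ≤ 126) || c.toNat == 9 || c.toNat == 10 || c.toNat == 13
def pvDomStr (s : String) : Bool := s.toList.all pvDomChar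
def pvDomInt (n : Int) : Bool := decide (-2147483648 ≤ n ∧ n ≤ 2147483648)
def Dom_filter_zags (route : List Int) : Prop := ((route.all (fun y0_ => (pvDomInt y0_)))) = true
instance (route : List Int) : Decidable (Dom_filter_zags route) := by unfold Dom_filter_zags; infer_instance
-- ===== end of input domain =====

-- B replaces A's O(n^2) restart-after-each-removal fixpoint loop with one O(n) stack pass.

-- ===== PORT A =====
-- A's inner for-loop: find the first i with route[i] == route[i+2] and return the
-- list with elements i and i+1 removed; none if no such i (then A's while loop stops).
def scanStepA : List Int → Option (List Int)
  | a :: b :: c :: t => if a = c then some (c :: t) else (scanStepA (b :: c :: t)).map (a :: ·)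
  | _ => none

theorem scanStepA_length : ∀ (r r' : List Int), scanStepA r = some r' → r'.length + 2 = r.length := by
  intro r
  induction r with
  | nil => intro r' h; simp [scanStepA] at h
  | cons a t ih =>
    match t with
    | [] => intro r' h; simp [scanStepA] at h
    | [b] => intro r' h; simp [scanStepA] at h
    | b :: c :: t =>
      intro r' h
      by_cases hac : a = c
      · simp [scanStepA, hac] at h
        subst h
        simp
      · simp [scanStepA, hac] at h
        obtain ⟨u, hu, hr'⟩ := h
        have := ih u hu
        subst hr'; simp at this ⊢; omega

-- A's while loop: repeat the scan until no removal happens.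
def filter_zags (route : List Int) : List Int :=
  match h : scanStepA route with
  | some r' => filter_zags r'
  | none => route
termination_by route.length
decreasing_by
  have := scanStepA_length route r' h
  omega

-- ===== PORT B =====
-- one step of B's stack loop (stack kept reversed: head = top, second = stack[-2])
def stepB (st : List Int) (x : Int) : List Int :=
  match st with
  | y :: a :: rest => if a = x then x :: rest else x :: y :: a :: rest
  | _ => x :: st

def filter_zags_alt (route : List Int) : List Int :=
  (route.foldl stepB []).reverse

-- ===== PRECONDITION & SPEC =====
def Spec_filter_zags (route : List Int) (out : List Int) : Prop := out = filter_zags_alt route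
instance (route : List Int) (out : List Int) : Decidable (Spec_filter_zags route out) := by unfold Spec_filter_zags; infer_instance

-- ===== CLAIM (what is proved, stated in full; the proofs are below) =====
def Claim_equal_filter_zags : Prop := ∀ (route : List Int), Dom_filter_zags route → Spec_filter_zags route (filter_zags route)

-- ===== LEMMAS AND PROOFS =====

-- "zag-free": no i with l[i] = l[i+2]
def zf : List Int → Bool
  | a :: b :: c :: t => (a ≠ c) && zf (b :: c :: t)
  | _ => true

theorem zf_tail : ∀ (d : Int) (m : List Int), zf (d :: m) = true → zf m = true := by
  intro d m h
  match m with
  | [] => rfl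
  | [e] => rfl
  | e :: f :: t => simp [zf] at h; exact h.2

theorem zf_middle : ∀ (l : List Int) (a y x : Int) (m : List Int),
    zf (l ++ a :: y :: x :: m) = true → a ≠ x := by
  intro l
  induction l with
  | nil => intro a y x m h; simp [zf] at h; exact h.1
  | cons d l ih =>
    intro a y x m h
    exact ih a y x m (zf_tail d _ (by simpa using h))

theorem zf_stepB (s : List Int) (x : Int) (hs : zf s = true) : zf (stepB s x) = true := by
  match s with
  | [] => simp [stepB, zf]
  | [y] => simp [stepB, zf]
  | y :: a :: rest =>
    by_cases hax : a = x
    · subst hax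
      simp [stepB]
      match rest with
      | [] => simp [zf]
      | [c] => simp [zf]
      | c :: d :: t =>
        simp [zf] at hs ⊢
        exact ⟨hs.2.1, hs.2.2⟩
    · simp [stepB, hax, zf]
      exact ⟨fun h => hax h.symm, hs⟩

theorem stepB_head (s : List Int) (x : Int) : ∃ t, stepB s x = x :: t := by
  match s with
  | [] => exact ⟨[], rfl⟩
  | [w] => exact ⟨[w], rfl⟩
  | w :: a :: rest =>
    by_cases h : a = x
    · exact ⟨rest, by simp [stepB, h]⟩
    · exact ⟨w :: a :: rest, by simp [stepB, h]⟩

theorem stepB_collapse (s : List Int) (x y : Int) (hs : zf s = true) :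
    stepB (stepB (stepB s x) y) x = stepB s x := by
  have h1 : zf (stepB s x) = true := zf_stepB s x hs
  obtain ⟨t, ht⟩ := stepB_head s x
  rw [ht] at h1 ⊢
  match t with
  | [] => simp [stepB]
  | a' :: rest' =>
    by_cases hay : a' = y
    · -- pushing y pops: stack becomes a' :: rest'
      subst hay
      show stepB (stepB (x :: a' :: rest') a') x = x :: a' :: rest'
      have h2 : stepB (x :: a' :: rest') a' = a' :: rest' := by simp [stepB]
      rw [h2]
      match rest' with
      | [] => simp [stepB]
      | c :: t' =>
        have hxc : x ≠ c := by simp [zf] at h1; exact h1.1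
        have : ¬ c = x := fun h => hxc (Eq.symm h)
        simp [stepB, this]
    · -- pushing y just pushes: y :: x :: a' :: rest', then x pops back
      show stepB (stepB (x :: a' :: rest') y) x = x :: a' :: rest'
      have h2 : stepB (x :: a' :: rest') y = y :: x :: a' :: rest' := by
        simp [stepB, hay]
      rw [h2, stepB]
      simp

theorem foldl_collapse (s : List Int) (x y : Int) (l2 : List Int) (hs : zf s = true) :
    List.foldl stepB s (x :: y :: x :: l2) = List.foldl stepB s (x :: l2) := by
  simp only [List.foldl]
  rw [stepB_collapse s x y hs]

theorem zf_foldl (l : List Int) : ∀ (s : List Int), zf s = true → zf (List.foldl stepB s l) = true := by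
  induction l with
  | nil => intro s hs; simpa using hs
  | cons x l ih => intro s hs; exact ih (stepB s x) (zf_stepB s x hs)

theorem run_collapse (l1 : List Int) (x y : Int) (l2 : List Int) :
    List.foldl stepB [] (l1 ++ x :: y :: x :: l2) = List.foldl stepB [] (l1 ++ x :: l2) := by
  rw [List.foldl_append, List.foldl_append]
  exact foldl_collapse _ x y l2 (zf_foldl l1 [] rfl)

-- A's one removal step decomposes the route as l1 ++ x::y::x::l2 ↦ l1 ++ x::l2
theorem scanStepA_decomp : ∀ (r r' : List Int), scanStepA r = some r' →
    ∃ l1 x y l2, r = l1 ++ x :: y :: x :: l2 ∧ r' = l1 ++ x :: l2 := by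
  intro r
  induction r with
  | nil => intro r' h; simp [scanStepA] at h
  | cons a t ih =>
    match t with
    | [] => intro r' h; simp [scanStepA] at h
    | [b] => intro r' h; simp [scanStepA] at h
    | b :: c :: t =>
      intro r' h
      by_cases hac : a = c
      · refine ⟨[], c, b, t, by simp [hac], ?_⟩
        simp [scanStepA, hac] at h
        simp [h]
      · simp [scanStepA, hac] at h
        obtain ⟨u, hu, hr'⟩ := h
        obtain ⟨l1, x, y, l2, he, hu'⟩ := ih u hu
        exact ⟨a :: l1, x, y, l2, by simp [he], by rw [← hr', hu']; simp⟩

-- when A's scan finds nothing, the route is zag-free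
theorem scanStepA_none_zf : ∀ (r : List Int), scanStepA r = none → zf r = true := by
  intro r
  induction r with
  | nil => intro _; rfl
  | cons a t ih =>
    match t with
    | [] => intro _; rfl
    | [b] => intro _; rfl
    | b :: c :: t =>
      intro h
      by_cases hac : a = c
      · simp [scanStepA, hac] at h
      · simp [scanStepA, hac] at h
        simp [zf, hac]
        exact ih h

-- on a zag-free input the stack pass never pops
theorem foldl_zf (r : List Int) : ∀ (s : List Int), zf (s.reverse ++ r) = true →
    List.foldl stepB s r = r.reverse ++ s := by
  induction r with
  | nil => intro s _; simp
  | cons x r' ih =>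
    intro s hs
    have hpush : stepB s x = x :: s := by
      match s with
      | [] => rfl
      | [y] => rfl
      | y :: a :: rest =>
        have : a ≠ x := by
          have : (rest.reverse ++ a :: y :: x :: r') = (y :: a :: rest).reverse ++ x :: r' := by
            simp
          exact zf_middle rest.reverse a y x r' (by rw [this]; exact hs)
        simp [stepB, this]
    simp only [List.foldl, hpush]
    have : (x :: s).reverse ++ r' = s.reverse ++ x :: r' := by simp
    rw [ih (x :: s) (by rw [this]; exact hs)]
    simp

theorem filter_zags_some (r r' : List Int) (h : scanStepA r = some r') :
    filter_zags r = filter_zags r' := by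
  rw [filter_zags]
  split
  · next u hu => rw [h] at hu; cases hu; rfl
  · next hn => rw [h] at hn; cases hn

theorem filter_zags_none (r : List Int) (h : scanStepA r = none) :
    filter_zags r = r := by
  rw [filter_zags]
  split
  · next u hu => rw [h] at hu; cases hu
  · rfl

theorem filter_zags_eq_run : ∀ (r : List Int),
    filter_zags r = (List.foldl stepB [] r).reverse := by
  intro r
  induction r using filter_zags.induct with
  | case1 r r' hscan ih =>
    rw [filter_zags_some r r' hscan]
    obtain ⟨l1, x, y, l2, he, hr'⟩ := scanStepA_decomp r r' hscan
    rw [ih, he, hr', run_collapse]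
  | case2 r hscan =>
    rw [filter_zags_none r hscan]
    have hzf := scanStepA_none_zf r hscan
    rw [foldl_zf r [] (by simpa using hzf)]
    simp

-- ===== VERDICT (by name: the statement is the Claim_ definition above) =====
theorem filter_zags_spec : Claim_equal_filter_zags := by
  intro route _
  unfold Spec_filter_zags filter_zags_alt
  exact filter_zags_eq_run route
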